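-- pv_equiv track=rewrite | github.com/PolarBear85/freecodecamp-projects | Python/Daily_Code_Challenge/250828-get-laptop-cost.py | get_laptop_cost
-- ===== SOURCE A (Python) =====
-- def get_laptop_cost(laptops, budget):
--
--     prices = sorted(set(laptops),reverse =True)
--
--     if (len(prices)) >= 2 and prices[1] <= budget:
--         return prices[1]
--
--     for price in prices:
--         if price <= budget:
--             return price
--
--     return 0
-- ===== SOURCE B (Python) =====
-- def get_laptop_cost(laptops, budget):
--     # One linear pass: track the top two distinct prices and the best price within budget.
--     m1 = m2 = best = None
--     for x in laptops:
--         if m1 is None or x > m1: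
--             m1, m2 = x, m1
--         elif x < m1 and (m2 is None or x > m2):
--             m2 = x
--         if x <= budget and (best is None or x > best):
--             best = x
--     if m2 is not None and m2 <= budget:
--         return m2
--     if best is not None:
--         return best
--     return 0
-- ===== Notes on version B (the rewrite author's own statement) =====
-- stated objective: faster
-- what changed: Replaced sort-of-the-dedup-set plus a scan with a single linear pass that tracks the top two distinct prices and the maximum price within budget.
import Mathlib
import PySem

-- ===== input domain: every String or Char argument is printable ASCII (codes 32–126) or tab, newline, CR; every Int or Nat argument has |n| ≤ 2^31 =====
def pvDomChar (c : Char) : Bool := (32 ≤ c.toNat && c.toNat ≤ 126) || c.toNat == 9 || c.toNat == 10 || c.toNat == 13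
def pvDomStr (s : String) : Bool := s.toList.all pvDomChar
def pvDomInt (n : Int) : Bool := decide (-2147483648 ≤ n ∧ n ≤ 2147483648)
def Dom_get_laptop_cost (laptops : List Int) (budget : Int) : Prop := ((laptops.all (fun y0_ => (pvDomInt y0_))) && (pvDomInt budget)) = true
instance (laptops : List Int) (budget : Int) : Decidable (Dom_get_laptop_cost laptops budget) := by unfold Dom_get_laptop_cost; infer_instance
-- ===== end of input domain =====

-- B replaces A's sort of the deduplicated prices by one linear pass tracking the top two
-- distinct prices and the maximum price within budget (objective: faster).

-- ===== PORT A =====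
-- the 'for price in prices: if price <= budget: return price' loop, with the final 'return 0'
def aLoop (budget : Int) : List Int → Int
  | [] => 0
  | p :: rest => if p ≤ budget then p else aLoop budget rest

def get_laptop_cost (laptops : List Int) (budget : Int) : Int :=
  let prices := PySem.List.sorted (PySem.Set.ofList laptops) (fun x => x) true
  if 2 ≤ prices.length ∧ PySem.List.pyGetD prices 1 0 ≤ budget then
    PySem.List.pyGetD prices 1 0
  else
    aLoop budget prices

-- ===== PORT B =====
-- the first if/elif of Source B's loop body: update of (m1, m2)
def topStep : Option Int × Option Int → Int → Option Int × Option Int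
  | (none, m2), x => (some x, m2)
  | (some a, m2), x =>
    if a < x then (some x, some a)
    else if x < a ∧ (m2 = none ∨ ∃ b, m2 = some b ∧ b < x) then (some a, some x)
    else (some a, m2)

-- the second if of Source B's loop body: update of best
def bestStep (budget : Int) (best : Option Int) (x : Int) : Option Int :=
  if x ≤ budget ∧ (best = none ∨ ∃ c, best = some c ∧ c < x) then some x else best

def altStep (budget : Int) (st : Option Int × Option Int × Option Int) (x : Int) :
    Option Int × Option Int × Option Int :=
  let t := topStep (st.1, st.2.1) x
  (t.1, t.2, bestStep budget st.2.2 x)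

def get_laptop_cost_alt (laptops : List Int) (budget : Int) : Int :=
  match laptops.foldl (altStep budget) (none, none, none) with
  | (_, some b, best) =>
    if b ≤ budget then b
    else match best with
      | some c => c
      | none => 0
  | (_, none, best) =>
    match best with
    | some c => c
    | none => 0

-- ===== PRECONDITION & SPEC =====
def Spec_get_laptop_cost (laptops : List Int) (budget : Int) (out : Int) : Prop := out = get_laptop_cost_alt laptops budget
instance (laptops : List Int) (budget : Int) (out : Int) : Decidable (Spec_get_laptop_cost laptops budget out) := by unfold Spec_get_laptop_cost; infer_instance

-- ===== CLAIM (what is proved, stated in full; the proofs are below) =====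
def Claim_equal_get_laptop_cost : Prop := ∀ (laptops : List Int) (budget : Int), Dom_get_laptop_cost laptops budget → Spec_get_laptop_cost laptops budget (get_laptop_cost laptops budget)

-- ===== LEMMAS AND PROOFS =====

-- invariant of the (m1, m2) part of the fold state after processing list l:
-- m1 is the maximum of l, m2 the greatest element strictly below it
def InvTop (l : List Int) : Option Int × Option Int → Prop
  | (none, m2) => l = [] ∧ m2 = none
  | (some a, none) => a ∈ l ∧ (∀ z ∈ l, z = a)
  | (some a, some b) => a ∈ l ∧ (∀ z ∈ l, z ≤ a) ∧ b ∈ l ∧ b < a ∧ (∀ z ∈ l, z < a → z ≤ b)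

-- invariant of 'best': the maximum element of l that is ≤ budget
def InvBest (budget : Int) (l : List Int) : Option Int → Prop
  | none => ∀ z ∈ l, budget < z
  | some c => c ∈ l ∧ c ≤ budget ∧ (∀ z ∈ l, z ≤ budget → z ≤ c)

def BInv (budget : Int) (l : List Int) (st : Option Int × Option Int × Option Int) : Prop :=
  InvTop l (st.1, st.2.1) ∧ InvBest budget l st.2.2

-- reduction equations for topStep
theorem topStep_gt {a x : Int} (m2 : Option Int) (h : a < x) :
    topStep (some a, m2) x = (some x, some a) := by simp [topStep, h]

theorem topStep_mid_none {a x : Int} (h1 : ¬ a < x) (h2 : x < a) :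
    topStep (some a, none) x = (some a, some x) := by simp [topStep, h1, h2]

theorem topStep_mid_some {a b x : Int} (h1 : ¬ a < x) (h2 : x < a) (h3 : b < x) :
    topStep (some a, some b) x = (some a, some x) := by simp [topStep, h1, h2, h3]

theorem topStep_keep_none {a x : Int} (h1 : ¬ a < x) (h2 : ¬ x < a) :
    topStep (some a, none) x = (some a, none) := by simp [topStep, h1, h2]

theorem topStep_keep_some {a b x : Int} (h1 : ¬ a < x) (h2 : ¬ (x < a ∧ b < x)) :
    topStep (some a, some b) x = (some a, some b) := by
  by_cases hxa : x < a
  · have hbx : ¬ b < x := fun hb => h2 ⟨hxa, hb⟩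
    simp [topStep, h1, hxa, hbx]
  · simp [topStep, h1, hxa]

theorem bestStep_take {c : Int} (budget x : Int) (best : Option Int)
    (hx : x ≤ budget) (hb : best = none ∨ best = some c ∧ c < x) :
    bestStep budget best x = some x := by
  rcases hb with hb | ⟨hb, hc⟩
  · subst hb; simp [bestStep, hx]
  · subst hb; simp [bestStep, hx, hc]

theorem bestStep_keep_of_over (budget x : Int) (best : Option Int) (hx : ¬ x ≤ budget) :
    bestStep budget best x = best := by simp [bestStep, hx]

theorem bestStep_keep_some {c : Int} (budget x : Int) (hc : ¬ c < x) :
    bestStep budget (some c) x = some c := by simp [bestStep, hc]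

theorem top_step (l : List Int) (m1 m2 : Option Int) (h : InvTop l (m1, m2)) (x : Int) :
    InvTop (l ++ [x]) (topStep (m1, m2) x) := by
  cases m1 with
  | none =>
    obtain ⟨hl, hm2⟩ := h
    subst hl hm2
    simp [topStep, InvTop]
  | some a =>
    cases m2 with
    | none =>
      obtain ⟨ha, hall⟩ := h
      by_cases h1 : a < x
      · rw [topStep_gt _ h1]
        simp only [InvTop]
        refine ⟨by simp, ?_, by simp [ha], h1, ?_⟩
        · intro z hz
          rcases List.mem_append.1 hz with hz | hz
          · have := hall z hz; omega
          · simp at hz; omega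
        · intro z hz _
          rcases List.mem_append.1 hz with hz | hz
          · have := hall z hz; omega
          · simp at hz; omega
      · by_cases h2 : x < a
        · rw [topStep_mid_none h1 h2]
          simp only [InvTop]
          refine ⟨by simp [ha], ?_, by simp, h2, ?_⟩
          · intro z hz
            rcases List.mem_append.1 hz with hz | hz
            · have := hall z hz; omega
            · simp at hz; omega
          · intro z hz hza
            rcases List.mem_append.1 hz with hz | hz
            · have := hall z hz; omega
            · simp at hz; omega
        · rw [topStep_keep_none h1 h2]
          simp only [InvTop]
          refine ⟨by simp [ha], ?_⟩
          intro z hz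
          rcases List.mem_append.1 hz with hz | hz
          · exact hall z hz
          · simp at hz; omega
    | some b =>
      obtain ⟨ha, hmax, hb, hba, hsec⟩ := h
      by_cases h1 : a < x
      · rw [topStep_gt _ h1]
        simp only [InvTop]
        refine ⟨by simp, ?_, by simp [ha], h1, ?_⟩
        · intro z hz
          rcases List.mem_append.1 hz with hz | hz
          · have := hmax z hz; omega
          · simp at hz; omega
        · intro z hz _
          rcases List.mem_append.1 hz with hz | hz
          · have := hmax z hz; omega
          · simp at hz; omega
      · by_cases h2 : x < a ∧ b < x
        · rw [topStep_mid_some h1 h2.1 h2.2]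
          simp only [InvTop]
          refine ⟨by simp [ha], ?_, by simp, h2.1, ?_⟩
          · intro z hz
            rcases List.mem_append.1 hz with hz | hz
            · exact hmax z hz
            · simp at hz; omega
          · intro z hz hza
            rcases List.mem_append.1 hz with hz | hz
            · have := hsec z hz hza
              omega
            · simp at hz; omega
        · rw [topStep_keep_some h1 h2]
          simp only [InvTop]
          refine ⟨by simp [ha], ?_, by simp [hb], hba, ?_⟩
          · intro z hz
            rcases List.mem_append.1 hz with hz | hz
            · exact hmax z hz
            · simp at hz; omega
          · intro z hz hza
            rcases List.mem_append.1 hz with hz | hz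
            · exact hsec z hz hza
            · simp at hz
              have hxa : x < a := by omega
              have hbx : ¬ b < x := fun hb => h2 ⟨hxa, hb⟩
              omega

theorem best_step (budget : Int) (l : List Int) (best : Option Int)
    (h : InvBest budget l best) (x : Int) : InvBest budget (l ++ [x]) (bestStep budget best x) := by
  cases best with
  | none =>
    by_cases h1 : x ≤ budget
    · rw [bestStep_take (c := 0) budget x none h1 (Or.inl rfl)]
      simp only [InvBest]
      refine ⟨by simp, h1, ?_⟩
      intro z hz _
      rcases List.mem_append.1 hz with hz | hz
      · have := h z hz; omega
      · simp at hz; omega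
    · rw [bestStep_keep_of_over budget x none h1]
      simp only [InvBest]
      intro z hz
      rcases List.mem_append.1 hz with hz | hz
      · exact h z hz
      · simp at hz; omega
  | some c =>
    obtain ⟨hc, hcb, hcmax⟩ := h
    by_cases h1 : x ≤ budget ∧ c < x
    · rw [bestStep_take budget x (some c) h1.1 (Or.inr ⟨rfl, h1.2⟩)]
      simp only [InvBest]
      refine ⟨by simp, h1.1, ?_⟩
      intro z hz hzb
      rcases List.mem_append.1 hz with hz | hz
      · have := hcmax z hz hzb
        have := h1.2
        omega
      · simp at hz; omega
    · have hkeep : bestStep budget (some c) x = some c := by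
        by_cases hxb : x ≤ budget
        · exact bestStep_keep_some budget x (fun hcx => h1 ⟨hxb, hcx⟩)
        · exact bestStep_keep_of_over budget x (some c) hxb
      rw [hkeep]
      simp only [InvBest]
      refine ⟨by simp [hc], hcb, ?_⟩
      intro z hz hzb
      rcases List.mem_append.1 hz with hz | hz
      · exact hcmax z hz hzb
      · simp at hz
        have hxb : x ≤ budget := by omega
        have hcx : ¬ c < x := fun hcx => h1 ⟨hxb, hcx⟩
        omega

theorem inv_step (budget : Int) (l : List Int) (st : Option Int × Option Int × Option Int)
    (h : BInv budget l st) (x : Int) : BInv budget (l ++ [x]) (altStep budget st x) := by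
  obtain ⟨m1, m2, best⟩ := st
  obtain ⟨htop, hbest⟩ := h
  refine ⟨?_, best_step budget l best hbest x⟩
  have := top_step l m1 m2 htop x
  simpa [altStep] using this

theorem inv_foldl (budget : Int) : ∀ (xs pre : List Int) (st : Option Int × Option Int × Option Int),
    BInv budget pre st → BInv budget (pre ++ xs) (xs.foldl (altStep budget) st)
  | [], pre, st, h => by simpa using h
  | x :: xs, pre, st, h => by
    have h' := inv_step budget pre st h x
    have := inv_foldl budget xs (pre ++ [x]) (altStep budget st x) h'
    simpa [List.foldl_cons, List.append_assoc] using this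

theorem inv_fold (budget : Int) (laptops : List Int) :
    BInv budget laptops (laptops.foldl (altStep budget) (none, none, none)) := by
  have := inv_foldl budget laptops [] (none, none, none)
    (by exact ⟨⟨rfl, rfl⟩, by intro z hz; cases hz⟩)
  simpa using this

-- A's scan over a strictly decreasing list returns the maximum element ≤ budget, or 0 if none
theorem aLoop_spec (budget : Int) : ∀ (l : List Int), l.Pairwise (· > ·) →
    (∃ c, c ∈ l ∧ c ≤ budget ∧ (∀ z ∈ l, z ≤ budget → z ≤ c) ∧ aLoop budget l = c) ∨
    ((∀ z ∈ l, budget < z) ∧ aLoop budget l = 0)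
  | [], _ => Or.inr ⟨by simp, rfl⟩
  | p :: rest, hp => by
    have hhead : ∀ z ∈ rest, z < p := fun z hz => (List.pairwise_cons.1 hp).1 z hz
    by_cases h1 : p ≤ budget
    · left
      refine ⟨p, by simp, h1, ?_, by simp [aLoop, h1]⟩
      intro z hz _
      rcases List.mem_cons.1 hz with heq | hz
      · omega
      · have := hhead z hz; omega
    · rcases aLoop_spec budget rest (List.pairwise_cons.1 hp).2 with ⟨c, hc, hcb, hcmax, heq⟩ | ⟨hnone, heq⟩
      · left
        refine ⟨c, List.mem_cons_of_mem _ hc, hcb, ?_, by simp [aLoop, h1, heq]⟩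
        intro z hz hzb
        rcases List.mem_cons.1 hz with heq | hz
        · omega
        · exact hcmax z hz hzb
      · right
        refine ⟨?_, by simp [aLoop, h1, heq]⟩
        intro z hz
        rcases List.mem_cons.1 hz with heq | hz
        · omega
        · exact hnone z hz

theorem get_laptop_cost_spec : Claim_equal_get_laptop_cost := by
  intro laptops budget _
  simp only [Spec_get_laptop_cost, get_laptop_cost, get_laptop_cost_alt]
  have hinv := inv_fold budget laptops
  have hmem : ∀ x : Int, x ∈ PySem.List.sorted (PySem.Set.ofList laptops) (fun x => x) true ↔ x ∈ laptops := by
    intro x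
    rw [(PySem.List.sorted_perm _ _ _).mem_iff]
    exact PySem.Set.mem_ofList (xs := laptops) (y := x)
  have hdec : (PySem.List.sorted (PySem.Set.ofList laptops) (fun x => x) true).Pairwise (· > ·) := by
    have hge : (PySem.List.sorted (PySem.Set.ofList laptops) (fun x => x) true).Pairwise
        (fun a b : Int => b ≤ a) :=
      PySem.List.sorted_pairwise_rev (PySem.Set.ofList laptops) (fun x => x)
    have hnd : (PySem.List.sorted (PySem.Set.ofList laptops) (fun x => x) true).Nodup :=
      (PySem.List.sorted_perm _ _ _).nodup_iff.2 (PySem.Set.nodup_ofList _)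
    exact (hge.and hnd).imp (fun h => by omega)
  rcases hstate : laptops.foldl (altStep budget) (none, none, none) with ⟨m1, m2, best⟩
  rw [hstate] at hinv
  obtain ⟨htop, hbest⟩ := hinv
  simp only at htop hbest
  generalize hP : PySem.List.sorted (PySem.Set.ofList laptops) (fun x => x) true = prices at hmem hdec ⊢
  clear hP hstate
  cases prices with
  | nil =>
    -- laptops has no elements; everything is none and both sides are 0
    cases m2 with
    | some b =>
      exfalso
      cases m1 with
      | none => exact Option.some_ne_none _ htop.2
      | some a => exact absurd ((hmem a).2 htop.1) (by simp)
    | none =>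
      cases best with
      | some c => exact absurd ((hmem c).2 hbest.1) (by simp)
      | none => cases m1 <;> simp [aLoop, InvTop] at htop ⊢
  | cons a t =>
    cases t with
    | nil =>
      -- all elements of laptops equal a
      have ha : a ∈ laptops := (hmem a).1 (by simp)
      have hall : ∀ z ∈ laptops, z = a := by
        intro z hz
        have := (hmem z).2 hz
        simpa using this
      cases m2 with
      | some b =>
        exfalso
        cases m1 with
        | none => exact Option.some_ne_none _ htop.2
        | some a' =>
          obtain ⟨ha', _, hbm, hba', _⟩ := htop
          have h1 := hall a' ha'
          have h2 := hall b hbm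
          omega
      | none =>
        by_cases hab : a ≤ budget
        · cases best with
          | none => exact absurd hab (by have := hbest a ha; omega)
          | some c =>
            have hca := hall c hbest.1
            simp [aLoop, hab, hca]
        · cases best with
          | some c =>
            exfalso
            have hca := hall c hbest.1
            exact hab (hca ▸ hbest.2.1)
          | none => simp [aLoop, hab]
    | cons b rest =>
      have hab : b < a := (List.pairwise_cons.1 hdec).1 b (by simp)
      have hheadA : ∀ z ∈ b :: rest, z < a := (List.pairwise_cons.1 hdec).1
      have hheadB : ∀ z ∈ rest, z < b := (List.pairwise_cons.1 (List.pairwise_cons.1 hdec).2).1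
      have ha : a ∈ laptops := (hmem a).1 (by simp)
      have hbmem : b ∈ laptops := (hmem b).1 (by simp)
      have hamax : ∀ z ∈ laptops, z ≤ a := by
        intro z hz
        rcases List.mem_cons.1 ((hmem z).2 hz) with heq | hzt
        · omega
        · have := hheadA z hzt; omega
      have hbsec : ∀ z ∈ laptops, z < a → z ≤ b := by
        intro z hz hza
        rcases List.mem_cons.1 ((hmem z).2 hz) with heq | hzt
        · omega
        · rcases List.mem_cons.1 hzt with heq | hzr
          · omega
          · have := hheadB z hzr; omega
      have hget : PySem.List.pyGetD (a :: b :: rest) 1 0 = b := by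
        simp [PySem.List.pyGetD, PySem.List.pyGet?, PySem.List.pyIdx?]
      cases m1 with
      | none =>
        exfalso
        rcases htop with ⟨hl, _⟩
        rw [hl] at ha
        cases ha
      | some a' =>
        cases m2 with
        | none =>
          exfalso
          obtain ⟨ha', hall'⟩ := htop
          have h1 := hall' a ha
          have h2 := hall' b hbmem
          omega
        | some b' =>
          obtain ⟨ha'mem, hmax', hb'mem, hb'lt, hsec'⟩ := htop
          have haa' : a' = a := by
            have h1 := hamax a' ha'mem
            have h2 := hmax' a ha
            omega
          have hbb' : b' = b := by
            have h1 := hsec' b hbmem (by omega)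
            have h2 := hbsec b' hb'mem (by omega)
            omega
          rw [haa', hbb'] at *
          rw [hget]
          by_cases hbb : b ≤ budget
          · rw [if_pos ⟨by simp, hbb⟩]
            simp [hbb]
          · rw [if_neg (by intro h; exact hbb h.2)]
            simp only [if_neg hbb]
            rcases aLoop_spec budget (a :: b :: rest) hdec with ⟨c, hcmem, hcb, hcmax, heq⟩ | ⟨hnone, heq⟩
            · rw [heq]
              cases best with
              | none =>
                exfalso
                have := hbest c ((hmem c).1 hcmem)
                omega
              | some c' =>
                obtain ⟨hc'mem, hc'b, hc'max⟩ := hbest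
                have h1 := hcmax c' ((hmem c').2 hc'mem) hc'b
                have h2 := hc'max c ((hmem c).1 hcmem) hcb
                simp
                omega
            · rw [heq]
              cases best with
              | some c' =>
                exfalso
                have := hnone c' ((hmem c').2 hbest.1)
                have := hbest.2.1
                omega
              | none => simp
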